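-- pv_equiv track=rewrite | github.com/All-Hands-AI/ToM-SWE | utils/aggregate_user_behavior.py | _parse_preference_analysis
-- ===== SOURCE A (Python) =====
-- from typing import Any, Dict, List, Optional
--
-- def _parse_preference_analysis(result: str) -> Dict[str, Any]:
--     """Parse preference analysis result."""
--     analysis: Dict[str, List[str]] = {
--         "communication_patterns": [],
--         "workflow_preferences": [],
--         "technical_preferences": [],
--     }
--
--     if not result or result == "LLM not configured":
--         return analysis
--
--     result_lines = result.split("\n")
--     current_section = None
--
--     for line in result_lines:
--         stripped_line = line.strip()
--         if stripped_line.startswith("COMMUNICATION_PATTERNS:"):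
--             current_section = "communication_patterns"
--         elif stripped_line.startswith("WORKFLOW_PREFERENCES:"):
--             current_section = "workflow_preferences"
--         elif stripped_line.startswith("TECHNICAL_PREFERENCES:"):
--             current_section = "technical_preferences"
--         elif stripped_line.startswith("- ") and current_section:
--             analysis[current_section].append(stripped_line[2:].strip())
--
--     return analysis
-- ===== SOURCE B (Python) =====
-- def _parse_preference_analysis(result: str):
--     """Parse preference analysis result (block-oriented re-implementation:
--     locate each header line, then harvest the bullets of its block)."""
--     analysis = {
--         "communication_patterns": [],
--         "workflow_preferences": [],
--         "technical_preferences": [],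
--     }
--     if not result or result == "LLM not configured":
--         return analysis
--
--     prefixes = {
--         "COMMUNICATION_PATTERNS:": "communication_patterns",
--         "WORKFLOW_PREFERENCES:": "workflow_preferences",
--         "TECHNICAL_PREFERENCES:": "technical_preferences",
--     }
--
--     def header_key(line):
--         s = line.strip()
--         for p, k in prefixes.items():
--             if s.startswith(p):
--                 return k
--         return None
--
--     lines = result.split("\n")
--     pos = 0
--     while pos < len(lines):
--         key = header_key(lines[pos])
--         pos += 1
--         if key is None:
--             continue  # line before the first header (or stray): no block
--         start = pos
--         while pos < len(lines) and header_key(lines[pos]) is None: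
--             pos += 1
--         for line in lines[start:pos]:
--             s = line.strip()
--             if s.startswith("- "):
--                 analysis[key].append(s[2:].strip())
--     return analysis
-- ===== Notes on version B (the rewrite author's own statement) =====
-- stated objective: alternative
-- what changed: Replaces A's single stateful pass with a current_section variable by a block-oriented scan: locate each header line, take the block of lines up to the next header, and harvest that block's '- ' bullets into the header's list.
import Mathlib
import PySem

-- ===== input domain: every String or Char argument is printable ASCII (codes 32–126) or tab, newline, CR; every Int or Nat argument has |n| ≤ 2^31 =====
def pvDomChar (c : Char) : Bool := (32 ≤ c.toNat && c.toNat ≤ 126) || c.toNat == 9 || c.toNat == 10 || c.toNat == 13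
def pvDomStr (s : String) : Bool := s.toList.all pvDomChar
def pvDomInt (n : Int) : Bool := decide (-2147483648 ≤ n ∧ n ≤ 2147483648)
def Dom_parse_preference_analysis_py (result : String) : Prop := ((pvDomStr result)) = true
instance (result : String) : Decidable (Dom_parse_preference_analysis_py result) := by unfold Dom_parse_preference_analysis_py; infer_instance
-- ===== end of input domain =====

-- B replaces A's single stateful pass (current_section variable) by a block scan: find each
-- header, then harvest the '- ' bullets of the lines up to the next header (objective: alternative).

-- which of the three fixed dict keys a header selects
inductive PvSec where
  | cp | wp | tp
deriving DecidableEq, Repr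

-- the three fixed-key lists of the `analysis` dict, in insertion order
abbrev PvTriple := List String × List String × List String

def pvAppend (k : PvSec) (v : String) : PvTriple → PvTriple
  | (c, w, t) =>
    match k with
    | .cp => (c ++ [v], w, t)
    | .wp => (c, w ++ [v], t)
    | .tp => (c, w, t ++ [v])

def pvAssemble (a : PvTriple) : List (String × List String) :=
  [("communication_patterns", a.1), ("workflow_preferences", a.2.1), ("technical_preferences", a.2.2)]

-- ===== PORT A =====
-- the body of A's for-loop: state = (current_section, analysis)
def pvStepA (st : Option PvSec × PvTriple) (line : List Char) : Option PvSec × PvTriple :=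
  let s := PySem.Chars.strip line
  if PySem.Chars.startswith s "COMMUNICATION_PATTERNS:".toList then (some .cp, st.2)
  else if PySem.Chars.startswith s "WORKFLOW_PREFERENCES:".toList then (some .wp, st.2)
  else if PySem.Chars.startswith s "TECHNICAL_PREFERENCES:".toList then (some .tp, st.2)
  else if PySem.Chars.startswith s "- ".toList then
    match st.1 with
    | some k => (st.1, pvAppend k (String.ofList (PySem.Chars.strip (PySem.Chars.slice s (some 2) none))) st.2)
    | none => st
  else st

def parse_preference_analysis_py (result : String) : List (String × List String) :=
  if result = "" ∨ result = "LLM not configured" then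
    pvAssemble ([], [], [])
  else
    let result_lines := PySem.Chars.splitOn result.toList "\n".toList
    pvAssemble (result_lines.foldl pvStepA (none, ([], [], []))).2

-- ===== PORT B =====
-- Source B's header_key helper
def pvHeaderKey? (line : List Char) : Option PvSec :=
  let s := PySem.Chars.strip line
  if PySem.Chars.startswith s "COMMUNICATION_PATTERNS:".toList then some .cp
  else if PySem.Chars.startswith s "WORKFLOW_PREFERENCES:".toList then some .wp
  else if PySem.Chars.startswith s "TECHNICAL_PREFERENCES:".toList then some .tp
  else none

-- Source B's per-line bullet test: the item appended, if the stripped line starts with "- "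
def pvItem? (line : List Char) : Option String :=
  let s := PySem.Chars.strip line
  if PySem.Chars.startswith s "- ".toList then
    some (String.ofList (PySem.Chars.strip (PySem.Chars.slice s (some 2) none)))
  else none

def pvNoHdr (line : List Char) : Bool := (pvHeaderKey? line).isNone

-- Source B's inner `for line in lines[start:pos]` harvesting loop
def pvHarvest (k : PvSec) (block : List (List Char)) (acc : PvTriple) : PvTriple :=
  block.foldl (fun a line =>
    match pvItem? line with
    | some v => pvAppend k v a
    | none => a) acc

-- Source B's outer while-loop: the remaining lines are the suffix from `pos`
def pvGoB : PvTriple → List (List Char) → PvTriple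
  | acc, [] => acc
  | acc, l :: ls =>
    match pvHeaderKey? l with
    | some k => pvGoB (pvHarvest k (ls.takeWhile pvNoHdr) acc) (ls.dropWhile pvNoHdr)
    | none => pvGoB acc ls
termination_by _ ls => ls.length
decreasing_by
  · exact Nat.lt_succ_of_le (List.length_dropWhile_le _ _)
  · simp

def parse_preference_analysis_py_alt (result : String) : List (String × List String) :=
  if result = "" ∨ result = "LLM not configured" then
    pvAssemble ([], [], [])
  else
    let lines := PySem.Chars.splitOn result.toList "\n".toList
    pvAssemble (pvGoB ([], [], []) lines)

-- ===== PRECONDITION & SPEC =====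
def Spec_parse_preference_analysis_py (result : String) (out : List (String × List String)) : Prop := out = parse_preference_analysis_py_alt result
instance (result : String) (out : List (String × List String)) : Decidable (Spec_parse_preference_analysis_py result out) := by unfold Spec_parse_preference_analysis_py; infer_instance

-- ===== CLAIM (what is proved, stated in full; the proofs are below) =====
def Claim_equal_parse_preference_analysis_py : Prop := ∀ (result : String), Dom_parse_preference_analysis_py result → Spec_parse_preference_analysis_py result (parse_preference_analysis_py result)

-- ===== LEMMAS AND PROOFS =====

-- A's loop body, re-expressed through B's helpers
theorem pvStepA_eq (st : Option PvSec × PvTriple) (line : List Char) :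
    pvStepA st line =
      match pvHeaderKey? line with
      | some k => (some k, st.2)
      | none =>
        match st.1 with
        | some k => (some k, match pvItem? line with
            | some v => pvAppend k v st.2
            | none => st.2)
        | none => st := by
  obtain ⟨c, acc⟩ := st
  unfold pvStepA pvHeaderKey? pvItem?
  cases c <;> simp only [] <;> split_ifs <;> rfl

theorem pvHarvest_cons (k : PvSec) (l : List Char) (bs : List (List Char)) (acc : PvTriple) :
    pvHarvest k (l :: bs) acc =
      pvHarvest k bs (match pvItem? l with | some v => pvAppend k v acc | none => acc) := by
  simp [pvHarvest]

-- the fold with an active section equals B's harvest of the block up to the next header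
theorem pvFold_some (ls : List (List Char)) : ∀ (k : PvSec) (acc : PvTriple),
    (ls.foldl pvStepA (some k, acc)).2 =
      pvGoB (pvHarvest k (ls.takeWhile pvNoHdr) acc) (ls.dropWhile pvNoHdr) := by
  induction ls with
  | nil => intro k acc; simp [pvGoB, pvHarvest]
  | cons l ls ih =>
    intro k acc
    rw [List.foldl_cons, pvStepA_eq]
    cases h : pvHeaderKey? l with
    | some k' =>
      simp only [h]
      rw [ih k' acc]
      have hl : pvNoHdr l = false := by simp [pvNoHdr, h]
      rw [List.takeWhile_cons, List.dropWhile_cons, hl]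
      simp only [Bool.false_eq_true, if_false, pvGoB, h, pvHarvest, List.foldl_nil]
    | none =>
      simp only [h]
      have hl : pvNoHdr l = true := by simp [pvNoHdr, h]
      rw [List.takeWhile_cons, List.dropWhile_cons, hl]
      simp only [if_true]
      rw [pvHarvest_cons]
      exact ih k _
  
-- the fold with no active section equals B's block scan
theorem pvFold_none (ls : List (List Char)) : ∀ (acc : PvTriple),
    (ls.foldl pvStepA (none, acc)).2 = pvGoB acc ls := by
  induction ls with
  | nil => intro acc; simp [pvGoB]
  | cons l ls ih =>
    intro acc
    rw [List.foldl_cons, pvStepA_eq]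
    cases h : pvHeaderKey? l with
    | some k => simp only [pvGoB, h]; exact pvFold_some ls k acc
    | none => simp only [pvGoB, h]; exact ih acc

-- ===== VERDICT (by name: the statement is the Claim_ definition above) =====
theorem parse_preference_analysis_py_spec : Claim_equal_parse_preference_analysis_py := by
  intro result _
  unfold Spec_parse_preference_analysis_py parse_preference_analysis_py parse_preference_analysis_py_alt
  split_ifs with h
  · rfl
  · exact congrArg pvAssemble (pvFold_none _ _)
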